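-- pv_equiv track=rewrite | github.com/Szymon-Budziak/Algorithms_and_Data_Structures_course_AGH | Sort/19_the_largest_subset_of_numbers.py | largest_subset_of_numbers
-- ===== SOURCE A (Python) =====
-- def largest_subset_of_numbers(T):
--     n = max(T)
--     result = [0] * (n + 1)
--     for i in range(len(T)):
--         idx = 2
--         while idx <= T[i]:
--             if T[i] % idx == 0:
--                 result[idx] += 1
--             idx += 1
--     return max(result)
-- ===== SOURCE B (Python) =====
-- def largest_subset_of_numbers(T):
--     n = max(T)
--     freq = [0] * (n + 1)
--     for v in T:
--         if 2 <= v: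
--             freq[v] += 1
--     best = 0
--     for d in range(2, n + 1):
--         s = 0
--         m = d
--         while m <= n:
--             s += freq[m]
--             m += d
--         if s > best:
--             best = s
--     return best
-- ===== Notes on version B (the rewrite author's own statement) =====
-- stated objective: faster
-- what changed: A trial-divides every element by every candidate divisor (O(len(T)*max(T))); B builds a frequency array over values once and, for each divisor d, sums the frequencies of the multiples of d (harmonic sieve, O(len(T)+max(T)*log(max(T)))).
import Mathlib
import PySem

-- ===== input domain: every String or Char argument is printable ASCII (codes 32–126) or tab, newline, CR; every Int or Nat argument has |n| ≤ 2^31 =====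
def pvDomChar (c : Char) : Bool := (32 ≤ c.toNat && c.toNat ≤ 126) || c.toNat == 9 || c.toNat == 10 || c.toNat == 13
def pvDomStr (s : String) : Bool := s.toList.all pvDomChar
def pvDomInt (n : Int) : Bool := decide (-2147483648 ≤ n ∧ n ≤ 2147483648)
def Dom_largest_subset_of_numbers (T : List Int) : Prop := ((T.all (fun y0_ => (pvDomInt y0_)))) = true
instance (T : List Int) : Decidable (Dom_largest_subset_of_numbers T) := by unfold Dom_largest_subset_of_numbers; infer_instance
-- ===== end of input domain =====

-- B replaces A's per-element trial division over all candidate divisors by a frequency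
-- array plus a sieve that sums frequencies over the multiples of each divisor (objective: faster).

-- ===== PORT A =====
-- while idx <= T[i]: if T[i] % idx == 0: result[idx] += 1; idx += 1
-- (whenever a write happens, 2 <= idx <= T[i] <= max(T) < len(result), so pySetD/pyGetD are exact)
def lsnWhile (x : Int) (result : List Int) (idx : Int) : List Int :=
  if _h : idx ≤ x then
    lsnWhile x
      (if PySem.Int.mod x idx = 0 then
        PySem.List.pySetD result idx (PySem.List.pyGetD result idx 0 + 1)
      else result)
      (idx + 1)
  else result
termination_by (x + 1 - idx).toNat
decreasing_by omega

def largest_subset_of_numbers (T : List Int) : Int :=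
  match PySem.List.max? T (fun y => y) with
  | none => 0   -- max([]) raises ValueError: excluded by Pre_
  | some n =>
    let result : List Int := List.replicate (n + 1).toNat 0
    let result := (PySem.List.pyRange 0 (PySem.List.len T) 1).foldl
      (fun res i => lsnWhile (PySem.List.pyGetD T i 0) res 2) result
    (PySem.List.max? result (fun y => y)).getD 0  -- .getD 0 unreachable under Pre_: max([]) raises only when n < 0

-- ===== PORT B =====
-- s = 0; m = d; while m <= n: s += freq[m]; m += d   (tail-recursive port of Source B's inner while;
-- the '0 < d' conjunct only makes the recursion total — the call site always has d ≥ 2)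
def lsnSum (freq : Array Int) (nn d m s : Int) : Int :=
  if _h : m ≤ nn ∧ 0 < d then lsnSum freq nn d (m + d) (s + freq.getD m.toNat 0) else s
termination_by (nn + 1 - m).toNat
decreasing_by omega

-- Python's freq list is ported as an Array (a Python list is an array); the indices v and m are
-- always nonnegative and < len(freq) where they are used, so getD/setIfInBounds are exact there.
def largest_subset_of_numbers_alt (T : List Int) : Int :=
  match PySem.List.max? T (fun y => y) with
  | none => 0   -- max([]) raises ValueError: excluded by Pre_
  | some n =>
    let freq : Array Int := T.foldl (fun f v =>
        if 2 ≤ v then f.setIfInBounds v.toNat (f.getD v.toNat 0 + 1) else f)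
      (Array.replicate (n + 1).toNat (0 : Int))
    (PySem.List.pyRange 2 (n + 1) 1).foldl (fun best d =>
      let s := lsnSum freq n d d 0
      if best < s then s else best) 0

-- ===== PRECONDITION & SPEC =====
-- A raises ValueError on the empty list (max(T)) and on lists whose maximum is negative
-- (max() of the then-empty result list); exactly those inputs are excluded.
def Pre_largest_subset_of_numbers (T : List Int) : Prop := T ≠ [] ∧ ∃ x ∈ T, 0 ≤ x
instance (T : List Int) : Decidable (Pre_largest_subset_of_numbers T) := by
  unfold Pre_largest_subset_of_numbers; infer_instance
def pvWitness_largest_subset_of_numbers : List Int := [2, 3, 4, 6]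

def Spec_largest_subset_of_numbers (T : List Int) (out : Int) : Prop := out = largest_subset_of_numbers_alt T
instance (T : List Int) (out : Int) : Decidable (Spec_largest_subset_of_numbers T out) := by unfold Spec_largest_subset_of_numbers; infer_instance

-- ===== CLAIM (what is proved, stated in full; the proofs are below) =====
def Claim_equal_largest_subset_of_numbers : Prop := ∀ (T : List Int), Dom_largest_subset_of_numbers T → Pre_largest_subset_of_numbers T → Spec_largest_subset_of_numbers T (largest_subset_of_numbers T)

-- ===== LEMMAS AND PROOFS =====

-- lsnCnt T d: how many elements of T the divisor d (≥ 2) divides; this is A's result[d]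
-- and also B's sieve sum for d.
def lsnCnt (T : List Int) (d : Int) : Int :=
  (T.countP (fun v => decide (2 ≤ d ∧ d ≤ v ∧ PySem.Int.mod v d = 0)) : Int)

theorem lsnWhile_length (x : Int) (res : List Int) (idx : Int) :
    (lsnWhile x res idx).length = res.length := by
  fun_induction lsnWhile x res idx with
  | case1 res idx h ih =>
      simp only [dite_eq_ite] at ih
      rw [ih]
      split <;> simp [PySem.List.length_pySetD]
  | case2 => rfl

theorem lsnWhile_getD (x : Int) (res : List Int) (idx : Int) (h2 : 2 ≤ idx)
    (hx : x < (res.length : Int)) (j : Nat) :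
    (lsnWhile x res idx).getD j 0 =
      res.getD j 0 + (if idx ≤ (j : Int) ∧ (j : Int) ≤ x ∧ PySem.Int.mod x (j : Int) = 0 then 1 else 0) := by
  fun_induction lsnWhile x res idx with
  | case2 res idx h =>
      rw [if_neg (by omega)]; ring
  | case1 res idx h ih =>
      have hidx : idx = ((idx.toNat : Nat) : Int) := by omega
      have hlt : idx.toNat < res.length := by omega
      simp only [dite_eq_ite] at ih
      have hlen : (if PySem.Int.mod x idx = 0 then
          PySem.List.pySetD res idx (PySem.List.pyGetD res idx 0 + 1) else res).length = res.length := by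
        split <;> simp [PySem.List.length_pySetD]
      rw [ih (by omega) (by rw [hlen]; exact hx)]
      by_cases hm : PySem.Int.mod x idx = 0
      · rw [if_pos hm]
        rw [hidx]
        have key := PySem.List.pyGetD_pySetD_natCast res idx.toNat j
          (PySem.List.pyGetD res (↑idx.toNat) 0 + 1) 0 hlt
        simp only [PySem.List.pyGetD_natCast] at key
        simp only [PySem.List.pyGetD_natCast]
        rw [key, ← hidx]
        by_cases hj : (j : Int) = idx
        · have hjn : j = idx.toNat := by omega
          rw [if_pos hjn, if_neg (by omega), if_pos ⟨by omega, by omega, by rw [hj]; exact hm⟩]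
          rw [hjn]; ring
        · rw [if_neg (by omega)]
          have hiff : (idx + 1 ≤ (j:Int) ∧ (j:Int) ≤ x ∧ PySem.Int.mod x (j:Int) = 0) ↔
              (idx ≤ (j:Int) ∧ (j:Int) ≤ x ∧ PySem.Int.mod x (j:Int) = 0) := by
            constructor
            · rintro ⟨a, b, c⟩; exact ⟨by omega, b, c⟩
            · rintro ⟨a, b, c⟩; exact ⟨by omega, b, c⟩
          rw [if_congr hiff rfl rfl]
      · rw [if_neg hm]
        by_cases hj : (j : Int) = idx
        · rw [if_neg (by omega), if_neg (by rintro ⟨-, -, hc⟩; rw [hj] at hc; exact hm hc)]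
        · have hiff : (idx + 1 ≤ (j:Int) ∧ (j:Int) ≤ x ∧ PySem.Int.mod x (j:Int) = 0) ↔
              (idx ≤ (j:Int) ∧ (j:Int) ≤ x ∧ PySem.Int.mod x (j:Int) = 0) := by
            constructor
            · rintro ⟨a, b, c⟩; exact ⟨by omega, b, c⟩
            · rintro ⟨a, b, c⟩; exact ⟨by omega, b, c⟩
          rw [if_congr hiff rfl rfl]

theorem lsnFoldA_length (S : List Int) (res : List Int) :
    (S.foldl (fun res x => lsnWhile x res 2) res).length = res.length := by
  induction S generalizing res with
  | nil => rfl
  | cons v S ih => simp only [List.foldl_cons]; rw [ih, lsnWhile_length]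

theorem lsnFoldA_getD (S : List Int) (res : List Int)
    (hS : ∀ v ∈ S, v < (res.length : Int)) (j : Nat) :
    (S.foldl (fun res x => lsnWhile x res 2) res).getD j 0 =
      res.getD j 0 + (S.countP (fun v => decide (2 ≤ (j : Int) ∧ (j : Int) ≤ v ∧ PySem.Int.mod v (j : Int) = 0)) : Int) := by
  induction S generalizing res with
  | nil => simp
  | cons v S ih =>
      simp only [List.foldl_cons, List.countP_cons]
      rw [ih _ (by intro w hw; rw [lsnWhile_length]; exact hS w (by simp [hw]))]
      rw [lsnWhile_getD v res 2 le_rfl (hS v (by simp)) j]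
      by_cases hc : (2 ≤ (j:Int) ∧ (j:Int) ≤ v ∧ PySem.Int.mod v (j:Int) = 0)
      · rw [if_pos hc]
        simp only [hc, decide_true, and_true, if_true]
        push_cast
        ring
      · rw [if_neg hc]
        have : (decide (2 ≤ (j:Int) ∧ (j:Int) ≤ v ∧ PySem.Int.mod v (j:Int) = 0)) = false := by
          simpa using hc
        simp only [this]
        push_cast
        ring

theorem lsnFoldB_getD (S : List Int) (f : List Int)
    (hS : ∀ v ∈ S, v < (f.length : Int)) (m : Nat) :
    (S.foldl (fun f v => if 2 ≤ v then PySem.List.pySetD f v (PySem.List.pyGetD f v 0 + 1) else f) f).getD m 0 =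
      f.getD m 0 + (S.countP (fun v => decide (v = (m : Int) ∧ 2 ≤ v)) : Int) := by
  induction S generalizing f with
  | nil => simp
  | cons v S ih =>
      simp only [List.foldl_cons, List.countP_cons]
      have hlen : (if 2 ≤ v then PySem.List.pySetD f v (PySem.List.pyGetD f v 0 + 1) else f).length = f.length := by
        split <;> simp [PySem.List.length_pySetD]
      rw [ih _ (by intro w hw; rw [hlen]; exact hS w (by simp [hw]))]
      by_cases h2 : 2 ≤ v
      · rw [if_pos h2]
        have hv : v = ((v.toNat : Nat) : Int) := by omega
        have hlt : v.toNat < f.length := by have := hS v (by simp); omega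
        rw [hv]
        have key := PySem.List.pyGetD_pySetD_natCast f v.toNat m
          (PySem.List.pyGetD f (↑v.toNat) 0 + 1) 0 hlt
        simp only [PySem.List.pyGetD_natCast] at key
        simp only [PySem.List.pyGetD_natCast]
        rw [key]
        by_cases hm : m = v.toNat
        · rw [if_pos hm]
          have hd : (decide (((v.toNat:Nat):Int) = (m : Int) ∧ 2 ≤ ((v.toNat:Nat):Int))) = true := by
            simp; omega
          rw [hd, hm]
          push_cast
          simp only [if_true]
          ring
        · rw [if_neg hm]
          have hd : (decide (((v.toNat:Nat):Int) = (m : Int) ∧ 2 ≤ ((v.toNat:Nat):Int))) = false := by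
            simp; omega
          simp only [hd, Bool.false_eq_true, if_false]
          push_cast
          ring
      · rw [if_neg h2]
        have hd : (decide (v = (m : Int) ∧ 2 ≤ v)) = false := by
          simp; omega
        simp only [hd, Bool.false_eq_true, if_false]
        push_cast
        ring

theorem lsn_countP_mem_cons (T : List Int) (m : Int) (R : List Int) (hm : m ∉ R) :
    T.countP (fun v => decide (v ∈ m :: R ∧ 2 ≤ v)) =
      T.countP (fun v => decide (v = m ∧ 2 ≤ v)) + T.countP (fun v => decide (v ∈ R ∧ 2 ≤ v)) := by
  induction T with
  | nil => simp
  | cons w T ih =>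
      simp only [List.countP_cons, List.mem_cons] at *
      rw [ih]
      have hone : (if (decide ((w = m ∨ w ∈ R) ∧ 2 ≤ w)) = true then 1 else 0) =
          ((if decide (w = m ∧ 2 ≤ w) = true then 1 else 0) +
            (if decide (w ∈ R ∧ 2 ≤ w) = true then 1 else 0) : Nat) := by
        by_cases h1 : w = m
        · subst h1
          by_cases h3 : 2 ≤ w <;> simp [h3, hm]
        · by_cases h2 : w ∈ R <;> by_cases h3 : 2 ≤ w <;> simp [h1, h2, h3]
      omega

theorem lsn_sum_counts (T : List Int) (R : List Int) (hR : R.Nodup) :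
    (R.map (fun m => (T.countP (fun v => decide (v = m ∧ 2 ≤ v)) : Int))).sum =
      (T.countP (fun v => decide (v ∈ R ∧ 2 ≤ v)) : Int) := by
  induction R with
  | nil => simp
  | cons m R ih =>
      simp only [List.map_cons, List.sum_cons]
      rw [ih (List.nodup_cons.mp hR).2, lsn_countP_mem_cons T m R (List.nodup_cons.mp hR).1]
      push_cast
      ring

theorem lsn_nodup_pyRange_pos (a b s : Int) (hs : 0 < s) : (PySem.List.pyRange a b s).Nodup := by
  rw [PySem.List.pyRange_of_pos a b hs]
  refine List.Nodup.map ?_ (List.nodup_range)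
  intro i j hij
  beta_reduce at hij
  have h1 : s * (i : Int) = s * (j : Int) := by omega
  have h2 := mul_left_cancel₀ (by omega : s ≠ 0) h1
  omega


-- Array.getD reads through toList
theorem lsn_arr_getD_toList (a : Array Int) (i : Nat) (d : Int) : a.getD i d = a.toList.getD i d := by
  simp only [Array.getD, List.getD]
  split
  · next h => simp [h, ← Array.getElem_toList]
  · next h => simp [Array.getElem?_eq_none_iff.mpr (by simpa using h)]

-- B's Array-typed frequency loop is the List-typed loop, through toList
theorem lsn_freq_toList (S : List Int) (f : Array Int) :
    (S.foldl (fun f v => if 2 ≤ v then f.setIfInBounds v.toNat (f.getD v.toNat 0 + 1) else f) f).toList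
      = S.foldl (fun f v => if 2 ≤ v then PySem.List.pySetD f v (PySem.List.pyGetD f v 0 + 1) else f) f.toList := by
  induction S generalizing f with
  | nil => rfl
  | cons v S ih =>
      simp only [List.foldl_cons]
      rw [ih]
      congr 1
      by_cases h2 : 2 ≤ v
      · rw [if_pos h2, if_pos h2]
        have hv : v = ((v.toNat : Nat) : Int) := by omega
        rw [Array.toList_setIfInBounds, lsn_arr_getD_toList]
        conv_rhs => rw [hv]
        rw [PySem.List.pySetD_natCast, PySem.List.pyGetD_natCast]
      · rw [if_neg h2, if_neg h2]

theorem lsn_pyRange_pos_nil (a b d : Int) (hd : 0 < d) (hba : b ≤ a) :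
    PySem.List.pyRange a b d = [] := by
  rw [PySem.List.pyRange_of_pos a b hd, if_neg (by omega)]
  rfl

theorem lsn_pyRange_pos_cons (a b d : Int) (hd : 0 < d) (hab : a < b) :
    PySem.List.pyRange a b d = a :: PySem.List.pyRange (a + d) b d := by
  have hcount : ((b - a + d - 1) / d).toNat = ((b - a - 1) / d).toNat + 1 := by
    have h1 : b - a + d - 1 = (b - a - 1) + 1 * d := by ring
    have h2 : (0:Int) ≤ (b - a - 1) / d := Int.ediv_nonneg (by omega) (by omega)
    rw [h1, Int.add_mul_ediv_right _ _ (by omega : d ≠ 0)]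
    omega
  rw [PySem.List.pyRange_of_pos a b hd, PySem.List.pyRange_of_pos (a + d) b hd, if_pos hab]
  have he : b - (a + d) + d - 1 = b - a - 1 := by ring
  rw [he]
  have hif : (if a + d < b then ((b - a - 1) / d).toNat else 0) = ((b - a - 1) / d).toNat := by
    split
    · rfl
    · next h =>
        have : (b - a - 1) / d = 0 := Int.ediv_eq_zero_of_lt (by omega) (by omega)
        omega
  rw [hif, hcount, List.range_succ_eq_map, List.map_cons, List.map_map]
  congr 1
  · simp
  · apply List.map_congr_left
    intro k _
    simp only [Function.comp_apply]
    push_cast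
    ring

theorem lsnSum_eq (freq : Array Int) (nn d m s : Int) (hd : 0 < d) :
    lsnSum freq nn d m s =
      s + ((PySem.List.pyRange m (nn + 1) d).map (fun k => freq.getD k.toNat 0)).sum := by
  fun_induction lsnSum freq nn d m s with
  | case1 m s h ih =>
      rw [lsn_pyRange_pos_cons m (nn + 1) d hd (by omega), List.map_cons, List.sum_cons, ih]
      ring
  | case2 m s h =>
      rw [lsn_pyRange_pos_nil m (nn + 1) d hd (by omega), List.map_nil, List.sum_nil, add_zero]

theorem lsn_result_eq (T : List Int) (n : Int) (hn : 0 ≤ n) (hub : ∀ v ∈ T, v ≤ n) :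
    (T.foldl (fun res x => lsnWhile x res 2) (List.replicate (n + 1).toNat 0)) =
      (PySem.List.pyRange 0 (n + 1) 1).map (fun d => lsnCnt T d) := by
  have hlen : (T.foldl (fun res x => lsnWhile x res 2) (List.replicate (n + 1).toNat 0)).length
      = (n + 1).toNat := by
    rw [lsnFoldA_length, List.length_replicate]
  apply List.ext_getElem
  · simp [hlen, PySem.List.length_pyRange_one]
  · intro i hi1 hi2
    rw [← List.getD_eq_getElem _ 0 hi1, ← List.getD_eq_getElem _ 0 hi2]
    rw [lsnFoldA_getD T _ (by
      intro v hv
      rw [List.length_replicate]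
      have := hub v hv
      omega) i]
    rw [List.getD_replicate _ (by rwa [hlen] at hi1)]
    have hi0 : i < (n + 1).toNat := by rw [hlen] at hi1; exact hi1
    have hi : i < (PySem.List.pyRange 0 (n + 1) 1).length := by
      simpa [PySem.List.length_pyRange_one] using hi0
    rw [List.getD_eq_getElem _ 0 (by simpa using hi2), List.getElem_map,
      PySem.List.getElem_pyRange_one 0 (n + 1) i (by simpa using hi)]
    simp only [lsnCnt, zero_add]

theorem lsn_sieve (T : List Int) (n d : Int) (hn : 0 ≤ n) (hd : 2 ≤ d) (hub : ∀ v ∈ T, v ≤ n) :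
    lsnSum (T.foldl (fun f v => if 2 ≤ v then f.setIfInBounds v.toNat (f.getD v.toNat 0 + 1) else f)
        (Array.replicate (n + 1).toNat (0 : Int))) n d d 0 = lsnCnt T d := by
  set freq := T.foldl (fun f v => if 2 ≤ v then f.setIfInBounds v.toNat (f.getD v.toNat 0 + 1) else f)
      (Array.replicate (n + 1).toNat (0 : Int)) with hfreq
  have htl : freq.toList = T.foldl
      (fun f v => if 2 ≤ v then PySem.List.pySetD f v (PySem.List.pyGetD f v 0 + 1) else f)
      (List.replicate (n + 1).toNat (0 : Int)) := by
    rw [hfreq, lsn_freq_toList]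
    simp
  rw [lsnSum_eq freq n d d 0 (by omega)]
  rw [List.map_congr_left (g := fun m => (T.countP (fun v => decide (v = m ∧ 2 ≤ v)) : Int)) ?_]
  · rw [lsn_sum_counts T _ (lsn_nodup_pyRange_pos d (n + 1) d (by omega))]
    have hcc : List.countP (fun v => decide (v ∈ PySem.List.pyRange d (n + 1) d ∧ 2 ≤ v)) T
        = List.countP (fun v => decide (2 ≤ d ∧ d ≤ v ∧ PySem.Int.mod v d = 0)) T := by
      apply List.countP_congr
      intro v hv
      simp only [decide_eq_true_eq]
      rw [PySem.List.mem_pyRange_iff_of_pos (by omega)]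
      have hvn : v ≤ n := hub v hv
      constructor
      · rintro ⟨⟨h1, h2, h3⟩, h4⟩
        refine ⟨hd, h1, ?_⟩
        rw [PySem.Int.mod_eq_zero_iff_dvd]
        have := dvd_add h3 (dvd_refl d)
        simpa using this
      · rintro ⟨-, h1, h2⟩
        rw [PySem.Int.mod_eq_zero_iff_dvd] at h2
        exact ⟨⟨h1, by omega, Int.dvd_sub h2 (dvd_refl d)⟩, by omega⟩
    rw [hcc, zero_add]
    rfl
  · intro m hm
    rw [PySem.List.mem_pyRange_iff_of_pos (by omega)] at hm
    obtain ⟨h1, h2, -⟩ := hm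
    rw [lsn_arr_getD_toList, htl]
    rw [lsnFoldB_getD T _ (by
      intro v hv
      rw [List.length_replicate]
      have := hub v hv
      omega) m.toNat]
    rw [List.getD_replicate _ (by omega)]
    have hm0 : ((m.toNat : Nat) : Int) = m := by omega
    rw [hm0]
    ring

theorem lsn_max_eq (T : List Int) (n : Int) (hn : 0 ≤ n) :
    List.foldl max 0 ((PySem.List.pyRange 1 (n + 1) 1).map (fun d => lsnCnt T d)) =
      List.foldl max 0 ((PySem.List.pyRange 2 (n + 1) 1).map (fun d => lsnCnt T d)) := by
  by_cases h1 : n = 0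
  · subst h1
    rw [PySem.List.pyRange_one_eq_nil (by omega), PySem.List.pyRange_one_eq_nil (by omega)]
  · rw [PySem.List.pyRange_one_cons (by omega : (1:Int) < n + 1), List.map_cons, List.foldl_cons]
    have : lsnCnt T 1 = 0 := by
      simp [lsnCnt]
    rw [this]
    norm_num

theorem main_equal (T : List Int) (hne : T ≠ []) (x : Int) (hx : x ∈ T) (hx0 : 0 ≤ x) :
    largest_subset_of_numbers T = largest_subset_of_numbers_alt T := by
  cases hmax : PySem.List.max? T (fun y => y) with
  | none => exact absurd ((PySem.List.max?_eq_none_iff T _).mp hmax) hne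
  | some n =>
    have hub : ∀ v ∈ T, v ≤ n := fun v hv => PySem.List.max?_isMax hmax v hv
    have hn : 0 ≤ n := le_trans hx0 (hub x hx)
    have hB : (PySem.List.pyRange 2 (n + 1) 1).foldl (fun best d =>
          if best < lsnSum
              (T.foldl (fun f v => if 2 ≤ v then f.setIfInBounds v.toNat (f.getD v.toNat 0 + 1) else f)
                (Array.replicate (n + 1).toNat (0 : Int))) n d d 0
          then lsnSum
              (T.foldl (fun f v => if 2 ≤ v then f.setIfInBounds v.toNat (f.getD v.toNat 0 + 1) else f)
                (Array.replicate (n + 1).toNat (0 : Int))) n d d 0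
          else best) 0
        = List.foldl max 0 ((PySem.List.pyRange 2 (n + 1) 1).map (fun d => lsnCnt T d)) := by
      rw [PySem.List.foldl_congr_mem _ _ (fun best d => max best (lsnCnt T d)) 0 ?_]
      · exact (List.foldl_map).symm
      · intro best d hd
        rw [PySem.List.mem_pyRange_one] at hd
        rw [lsn_sieve T n d hn (by omega) hub]
        beta_reduce
        rw [max_def]
        split <;> split <;> omega
    unfold largest_subset_of_numbers largest_subset_of_numbers_alt
    rw [hmax]
    simp only [PySem.List.len_eq]
    rw [PySem.List.foldl_pyRange_zero_pyGetD' T 0 (fun res x => lsnWhile x res 2)]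
    rw [lsn_result_eq T n hn hub]
    rw [PySem.List.pyRange_one_cons (by omega : (0:Int) < n + 1), List.map_cons,
      PySem.List.max?_id_cons, Option.getD_some]
    have hg0 : lsnCnt T 0 = 0 := by simp [lsnCnt]
    rw [hg0, hB]
    simp only [zero_add]
    exact lsn_max_eq T n hn

-- ===== VERDICT (by name: the statement is the Claim_ definition above) =====
theorem largest_subset_of_numbers_spec : Claim_equal_largest_subset_of_numbers := by
  intro T _ hpre
  unfold Pre_largest_subset_of_numbers at hpre
  obtain ⟨hne, x, hx, hx0⟩ := hpre
  unfold Spec_largest_subset_of_numbers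
  exact main_equal T hne x hx hx0
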